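-- pv_equiv track=rewrite | github.com/pypi-data/pypi-mirror-398 | packages/vnerrant/vnerrant-3.0.0rc4.tar.gz/vnerrant-3.0.0rc4/vnerrant/metrics/criteria.py | compareEdits
-- ===== SOURCE A (Python) =====
-- def compareEdits(hyp_edits: dict, ref_edits: dict) -> tuple[int, int, int, dict]:
--     """
--     Compare two sets of edits and return the TP, FP, FN, and category counts.
--     :param hyp_edits: The hypothesis edits.
--     :param ref_edits: The reference edits.
--     :return: The TP, FP, FN, and category counts.
--     """
--     tp = 0  # True Positives
--     fp = 0  # False Positives
--     fn = 0  # False Negatives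
--     cat_dict = {}  # {cat: [tp, fp, fn], ...}
--
--     for h_edit, h_cats in hyp_edits.items():
--         # noop hyp edits cannot be TP or FP
--         if h_cats[0] == "noop":
--             continue
--         # TRUE POSITIVES
--         if h_edit in ref_edits.keys():
--             # On occasion, multiple tokens at same span.
--             for h_cat in ref_edits[h_edit]:  # Use ref dict for TP
--                 tp += 1
--                 # Each dict value [TP, FP, FN]
--                 if h_cat in cat_dict.keys():
--                     cat_dict[h_cat][0] += 1
--                 else:
--                     cat_dict[h_cat] = [1, 0, 0]
--         # FALSE POSITIVES
--         else:
--             # On occasion, multiple tokens at same span.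
--             for h_cat in h_cats:
--                 fp += 1
--                 # Each dict value [TP, FP, FN]
--                 if h_cat in cat_dict.keys():
--                     cat_dict[h_cat][1] += 1
--                 else:
--                     cat_dict[h_cat] = [0, 1, 0]
--     for r_edit, r_cats in ref_edits.items():
--         # noop ref edits cannot be FN
--         if r_cats[0] == "noop":
--             continue
--         # FALSE NEGATIVES
--         if r_edit not in hyp_edits.keys():
--             # On occasion, multiple tokens at same span.
--             for r_cat in r_cats:
--                 fn += 1
--                 # Each dict value [TP, FP, FN]
--                 if r_cat in cat_dict.keys():
--                     cat_dict[r_cat][2] += 1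
--                 else:
--                     cat_dict[r_cat] = [0, 0, 1]
--     return tp, fp, fn, cat_dict
-- ===== SOURCE B (Python) =====
-- from collections import Counter
--
--
-- def compareEdits(hyp_edits: dict, ref_edits: dict) -> tuple[int, int, int, dict]:
--     """Materialise the counted (tag, category) event stream once via comprehensions
--     (tag 0=TP, 1=FP, 2=FN), then tally it with two Counters and build cat_dict by a
--     single merge comprehension over the first-occurrence order of categories."""
--     events = [ev
--               for e, cats in hyp_edits.items() if cats[0] != "noop"
--               for ev in ([(0, c) for c in ref_edits[e]] if e in ref_edits
--                          else [(1, c) for c in cats])]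
--     events += [(2, c)
--                for e, cats in ref_edits.items()
--                if cats[0] != "noop" and e not in hyp_edits
--                for c in cats]
--     pair_counts = Counter(events)
--     tag_totals = Counter(t for t, _ in events)
--     cat_dict = {c: [pair_counts[0, c], pair_counts[1, c], pair_counts[2, c]]
--                 for c in dict.fromkeys(c for _, c in events)}
--     return tag_totals[0], tag_totals[1], tag_totals[2], cat_dict
-- ===== Notes on version B (the rewrite author's own statement) =====
-- stated objective: alternative
-- what changed: B materialises the whole (tag, category) event stream once via comprehensions instead of A's two loops mutating running totals and a dict of [tp,fp,fn] triples, then tallies the finished stream with two Counters and builds cat_dict in one merge comprehension over the first-occurrence order.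
-- outside the precondition, e.g. on compareEdits({(0, 0): []}, {}): A raises IndexError, B raises IndexError
import Mathlib
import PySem

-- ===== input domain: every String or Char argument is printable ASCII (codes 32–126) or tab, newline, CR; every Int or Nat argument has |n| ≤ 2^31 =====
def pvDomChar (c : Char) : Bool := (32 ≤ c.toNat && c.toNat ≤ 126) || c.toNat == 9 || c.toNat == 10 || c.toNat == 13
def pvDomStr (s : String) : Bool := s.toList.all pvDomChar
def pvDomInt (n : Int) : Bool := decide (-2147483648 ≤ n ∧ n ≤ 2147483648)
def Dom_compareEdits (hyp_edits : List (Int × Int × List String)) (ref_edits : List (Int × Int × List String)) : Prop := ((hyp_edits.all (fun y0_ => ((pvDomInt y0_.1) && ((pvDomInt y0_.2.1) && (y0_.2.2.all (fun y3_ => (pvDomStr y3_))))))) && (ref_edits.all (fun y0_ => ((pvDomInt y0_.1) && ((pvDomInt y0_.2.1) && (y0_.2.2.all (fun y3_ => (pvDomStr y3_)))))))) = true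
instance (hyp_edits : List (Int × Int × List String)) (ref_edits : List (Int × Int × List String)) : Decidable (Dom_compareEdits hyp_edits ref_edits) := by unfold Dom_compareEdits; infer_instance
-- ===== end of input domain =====

-- B replaces A's stateful two-loop tally (running totals + a dict of mutated
-- [tp,fp,fn] triples) by materialising the (tag, category) event stream once and
-- counting it afterwards with Counters (objective: alternative; same asymptotic cost).

-- ===== PORT A =====
-- cats[0] as Python reads it; Pre_ excludes the empty lists on which Python raises IndexError
def pvHead0 (cats : List String) : String := cats.headD ""

-- first-match lookup on the association list; under Pre_'s distinct keys this is the dict lookup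
def pvLookup (l : List (Int × Int × List String)) (k : Int × Int) : Option (List String) :=
  match l with
  | [] => none
  | (a, b, v) :: t => if (a, b) = k then some v else pvLookup t k

-- cat_dict[c][i] += 1 on the stored triple
def pvBump (v : List Int) (i : Nat) : List Int := v.set i (v.getD i 0 + 1)

-- the fresh triple A inserts: 1 at slot i, 0 elsewhere
def pvInit (i : Nat) : List Int :=
  [if i = 0 then 1 else 0, if i = 1 then 1 else 0, if i = 2 then 1 else 0]

-- A's per-category bookkeeping: if c in cat_dict: bump slot i else insert the fresh triple
def pvTally (d : PySem.Dict String (List Int)) (i : Nat) (c : String) : PySem.Dict String (List Int) :=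
  if d.contains c then d.modify c [0, 0, 0] (fun v => pvBump v i) else d.insert c (pvInit i)

-- body of A's loop over hyp_edits
def pvStep1A (ref_edits : List (Int × Int × List String))
    (st : Int × Int × Int × PySem.Dict String (List Int)) (kv : Int × Int × List String) :
    Int × Int × Int × PySem.Dict String (List Int) :=
  if pvHead0 kv.2.2 = "noop" then st
  else
    match pvLookup ref_edits (kv.1, kv.2.1) with
    | some rcats =>
        rcats.foldl (fun st c => (st.1 + 1, st.2.1, st.2.2.1, pvTally st.2.2.2 0 c)) st
    | none =>
        kv.2.2.foldl (fun st c => (st.1, st.2.1 + 1, st.2.2.1, pvTally st.2.2.2 1 c)) st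

-- body of A's loop over ref_edits
def pvStep2A (hyp_edits : List (Int × Int × List String))
    (st : Int × Int × Int × PySem.Dict String (List Int)) (kv : Int × Int × List String) :
    Int × Int × Int × PySem.Dict String (List Int) :=
  if pvHead0 kv.2.2 = "noop" then st
  else
    match pvLookup hyp_edits (kv.1, kv.2.1) with
    | some _ => st
    | none =>
        kv.2.2.foldl (fun st c => (st.1, st.2.1, st.2.2.1 + 1, pvTally st.2.2.2 2 c)) st

def compareEdits (hyp_edits : List (Int × Int × List String)) (ref_edits : List (Int × Int × List String)) : Int × Int × Int × (List (String × List Int)) :=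
  let s1 := hyp_edits.foldl (pvStep1A ref_edits)
    ((0 : Int), (0 : Int), (0 : Int), (PySem.Dict.empty : PySem.Dict String (List Int)))
  let s2 := ref_edits.foldl (pvStep2A hyp_edits) s1
  (s2.1, s2.2.1, s2.2.2.1, s2.2.2.2.items)

-- ===== PORT B =====
-- the inner 'if cats[0] != "noop" … ([(0,c) …] if e in ref_edits else [(1,c) …])' of Source B's first comprehension
def pvEvH (ref_edits : List (Int × Int × List String)) (kv : Int × Int × List String) : List (Nat × String) :=
  if pvHead0 kv.2.2 = "noop" then []
  else
    match pvLookup ref_edits (kv.1, kv.2.1) with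
    | some rcats => rcats.map (fun c => (0, c))
    | none => kv.2.2.map (fun c => (1, c))

-- Source B's second comprehension: the FN events
def pvEvR (hyp_edits : List (Int × Int × List String)) (kv : Int × Int × List String) : List (Nat × String) :=
  if pvHead0 kv.2.2 = "noop" then []
  else
    match pvLookup hyp_edits (kv.1, kv.2.1) with
    | some _ => []
    | none => kv.2.2.map (fun c => (2, c))

def compareEdits_alt (hyp_edits : List (Int × Int × List String)) (ref_edits : List (Int × Int × List String)) : Int × Int × Int × (List (String × List Int)) :=
  let events := hyp_edits.flatMap (pvEvH ref_edits) ++ ref_edits.flatMap (pvEvR hyp_edits)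
  let pairCounts := PySem.Dict.counter events          -- Counter(events)
  let tagTotals := PySem.Dict.counter (events.map (·.1))  -- Counter(t for t,_ in events)
  let catDict := (PySem.List.dedup (events.map (·.2))).map   -- dict.fromkeys(c for _,c in events)
    (fun c => (c, [pairCounts.getD (0, c) 0, pairCounts.getD (1, c) 0, pairCounts.getD (2, c) 0]))
  (tagTotals.getD 0 0, tagTotals.getD 1 0, tagTotals.getD 2 0, catDict)

-- ===== PRECONDITION & SPEC =====
-- Pre_ excludes (a) inputs with an empty category list, on which the Python raises
-- IndexError at h_cats[0]/r_cats[0], and (b) association lists with duplicate keys,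
-- which do not represent a Python dict (the dict literal collapses them).
def Pre_compareEdits (hyp_edits : List (Int × Int × List String)) (ref_edits : List (Int × Int × List String)) : Prop :=
  (∀ kv ∈ hyp_edits, kv.2.2 ≠ []) ∧ (∀ kv ∈ ref_edits, kv.2.2 ≠ []) ∧
  (hyp_edits.map (fun kv => ((kv.1, kv.2.1) : Int × Int))).Nodup ∧
  (ref_edits.map (fun kv => ((kv.1, kv.2.1) : Int × Int))).Nodup
instance (hyp_edits : List (Int × Int × List String)) (ref_edits : List (Int × Int × List String)) : Decidable (Pre_compareEdits hyp_edits ref_edits) := by unfold Pre_compareEdits; infer_instance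

def pvWitness_compareEdits : (List (Int × Int × List String)) × (List (Int × Int × List String)) :=
  ([(0, 1, ["R:NOUN"]), (2, 3, ["noop"])], [(0, 1, ["M:DET"]), (4, 5, ["U:PREP"])])

def Spec_compareEdits (hyp_edits : List (Int × Int × List String)) (ref_edits : List (Int × Int × List String)) (out : Int × Int × Int × (List (String × List Int))) : Prop := out = compareEdits_alt hyp_edits ref_edits
instance (hyp_edits : List (Int × Int × List String)) (ref_edits : List (Int × Int × List String)) (out : Int × Int × Int × (List (String × List Int))) : Decidable (Spec_compareEdits hyp_edits ref_edits out) := by unfold Spec_compareEdits; infer_instance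

-- ===== CLAIM (what is proved, stated in full; the proofs are below) =====
def Claim_equal_compareEdits : Prop := ∀ (hyp_edits : List (Int × Int × List String)) (ref_edits : List (Int × Int × List String)), Dom_compareEdits hyp_edits ref_edits → Pre_compareEdits hyp_edits ref_edits → Spec_compareEdits hyp_edits ref_edits (compareEdits hyp_edits ref_edits)

-- ===== LEMMAS AND PROOFS =====

-- the categories counted with tag i, in order
def pvStream (i : Nat) (evs : List (Nat × String)) : List String :=
  (evs.filter (fun e => e.1 == i)).map (·.2)

theorem pvStream_append (i : Nat) (xs ys : List (Nat × String)) :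
    pvStream i (xs ++ ys) = pvStream i xs ++ pvStream i ys := by
  simp [pvStream]

theorem pvStream_map_tag (i j : Nat) (r : List String) :
    pvStream i (r.map (fun c => (j, c))) = if j = i then r else [] := by
  simp only [pvStream, List.filter_map, List.map_map]
  split
  · next h => simp [Function.comp_def, h]
  · next h => simp [Function.comp_def, List.filter_eq_nil_iff, h]

theorem pvStream_eq_nil {i : Nat} {l : List (Nat × String)} (h : ∀ e ∈ l, e.1 ≠ i) :
    pvStream i l = [] := by
  simp only [pvStream, List.map_eq_nil_iff, List.filter_eq_nil_iff]
  intro e he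
  simpa using h e he

theorem pvCount_map_fst (i : Nat) (l : List (Nat × String)) :
    (l.map (·.1)).count i = (pvStream i l).length := by
  induction l with
  | nil => rfl
  | cons e t ih =>
      by_cases h : e.1 = i <;> simp [pvStream, h] <;> simp [pvStream] at ih <;> omega

-- A's three inner loops, in closed form
theorem pvInnerTP (r : List String) (a b k : Int) (d : PySem.Dict String (List Int)) :
    r.foldl (fun st c => (st.1 + 1, st.2.1, st.2.2.1, pvTally st.2.2.2 0 c)) (a, b, k, d)
      = (a + r.length, b, k, r.foldl (fun d c => pvTally d 0 c) d) := by
  induction r generalizing a d with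
  | nil => simp
  | cons c t ih => simp only [List.foldl_cons, ih]; congr 1; simp only [List.length_cons]; push_cast; omega

theorem pvInnerFP (r : List String) (a b k : Int) (d : PySem.Dict String (List Int)) :
    r.foldl (fun st c => (st.1, st.2.1 + 1, st.2.2.1, pvTally st.2.2.2 1 c)) (a, b, k, d)
      = (a, b + r.length, k, r.foldl (fun d c => pvTally d 1 c) d) := by
  induction r generalizing b d with
  | nil => simp
  | cons c t ih => simp only [List.foldl_cons, ih]; congr 2; simp only [List.length_cons]; push_cast; omega

theorem pvInnerFN (r : List String) (a b k : Int) (d : PySem.Dict String (List Int)) :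
    r.foldl (fun st c => (st.1, st.2.1, st.2.2.1 + 1, pvTally st.2.2.2 2 c)) (a, b, k, d)
      = (a, b, k + r.length, r.foldl (fun d c => pvTally d 2 c) d) := by
  induction r generalizing k d with
  | nil => simp
  | cons c t ih => simp only [List.foldl_cons, ih]; congr 3; simp only [List.length_cons]; push_cast; omega

theorem pvLoopA1 (ref_edits : List (Int × Int × List String)) :
    ∀ (hyp_edits : List (Int × Int × List String)) (a b k : Int) (d : PySem.Dict String (List Int)),
    hyp_edits.foldl (pvStep1A ref_edits) (a, b, k, d)
      = (a + (pvStream 0 (hyp_edits.flatMap (pvEvH ref_edits))).length,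
         b + (pvStream 1 (hyp_edits.flatMap (pvEvH ref_edits))).length,
         k,
         (hyp_edits.flatMap (pvEvH ref_edits)).foldl (fun d e => pvTally d e.1 e.2) d) := by
  intro hyp_edits
  induction hyp_edits with
  | nil => intro a b k d; simp [pvStream]
  | cons kv t ih =>
      intro a b k d
      simp only [List.foldl_cons, List.flatMap_cons]
      by_cases hn : pvHead0 kv.2.2 = "noop"
      · simp [pvStep1A, pvEvH, hn, ih]
      · cases hl : pvLookup ref_edits (kv.1, kv.2.1) with
        | some rcats =>
            simp only [pvStep1A, if_neg hn, hl]
            rw [pvInnerTP, ih]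
            simp [pvEvH, hn, hl, pvStream_append, pvStream_map_tag, List.foldl_append,
              List.foldl_map]
            ring_nf
        | none =>
            simp only [pvStep1A, if_neg hn, hl]
            rw [pvInnerFP, ih]
            simp [pvEvH, hn, hl, pvStream_append, pvStream_map_tag, List.foldl_append,
              List.foldl_map]
            ring_nf

theorem pvLoopA2 (hyp_edits : List (Int × Int × List String)) :
    ∀ (ref_edits : List (Int × Int × List String)) (a b k : Int) (d : PySem.Dict String (List Int)),
    ref_edits.foldl (pvStep2A hyp_edits) (a, b, k, d)
      = (a, b,
         k + (pvStream 2 (ref_edits.flatMap (pvEvR hyp_edits))).length,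
         (ref_edits.flatMap (pvEvR hyp_edits)).foldl (fun d e => pvTally d e.1 e.2) d) := by
  intro ref_edits
  induction ref_edits with
  | nil => intro a b k d; simp [pvStream]
  | cons kv t ih =>
      intro a b k d
      simp only [List.foldl_cons, List.flatMap_cons]
      by_cases hn : pvHead0 kv.2.2 = "noop"
      · simp [pvStep2A, pvEvR, hn, ih]
      · cases hl : pvLookup hyp_edits (kv.1, kv.2.1) with
        | some rcats =>
            simp only [pvStep2A, if_neg hn, hl]
            rw [ih]
            simp [pvEvR, hn, hl]
        | none =>
            simp only [pvStep2A, if_neg hn, hl]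
            rw [pvInnerFN, ih]
            simp [pvEvR, hn, hl, pvStream_append, pvStream_map_tag, List.foldl_append,
              List.foldl_map]
            ring_nf

theorem pvEvH_fst (ref_edits : List (Int × Int × List String)) (hyp_edits : List (Int × Int × List String)) :
    ∀ e ∈ hyp_edits.flatMap (pvEvH ref_edits), e.1 = 0 ∨ e.1 = 1 := by
  intro e he
  simp only [List.mem_flatMap] at he
  obtain ⟨kv, _, hm⟩ := he
  unfold pvEvH at hm
  split at hm
  · simp at hm
  · split at hm <;> simp only [List.mem_map] at hm <;> obtain ⟨c, _, rfl⟩ := hm <;> simp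

theorem pvEvR_fst (hyp_edits : List (Int × Int × List String)) (ref_edits : List (Int × Int × List String)) :
    ∀ e ∈ ref_edits.flatMap (pvEvR hyp_edits), e.1 = 2 := by
  intro e he
  simp only [List.mem_flatMap] at he
  obtain ⟨kv, _, hm⟩ := he
  unfold pvEvR at hm
  split at hm
  · simp at hm
  · split at hm
    · simp at hm
    · simp only [List.mem_map] at hm; obtain ⟨c, _, rfl⟩ := hm; rfl

-- the per-event dict update, seen through getD
theorem pvTally_getD (d : PySem.Dict String (List Int)) (i : Nat) (c c' : String) :
    (pvTally d i c').getD c [0, 0, 0]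
      = if c = c' then pvBump (d.getD c' [0, 0, 0]) i else d.getD c [0, 0, 0] := by
  unfold pvTally
  by_cases hc : d.contains c' = true
  · rw [if_pos hc, PySem.Dict.getD_modify]
  · rw [if_neg hc, PySem.Dict.getD_insert]
    rw [PySem.Dict.getD_of_not_contains (k := c') d [0, 0, 0] (by simpa using hc)]
    have hb : pvBump [0, 0, 0] i = pvInit i := by
      match i with
      | 0 => rfl
      | 1 => rfl
      | 2 => rfl
      | (n + 3) =>
          simp [pvBump, pvInit, List.set_eq_of_length_le]
    rw [hb]

theorem pvTally_keys (d : PySem.Dict String (List Int)) (i : Nat) (c : String) :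
    (pvTally d i c).keys = PySem.Set.add d.keys c := by
  unfold pvTally PySem.Set.add
  by_cases hc : d.contains c = true
  · rw [if_pos hc, PySem.Dict.keys_modify, PySem.Dict.keys_insert_of_contains _ _ hc,
      if_pos (by simpa [List.contains_iff_mem, ← PySem.Dict.contains_iff_mem_keys] using hc)]
  · rw [if_neg hc, PySem.Dict.keys_insert_of_not_contains _ _ (by simpa using hc),
      if_neg (by simpa [List.contains_iff_mem, ← PySem.Dict.contains_iff_mem_keys] using hc)]

theorem pvTallyFold_keys (evs : List (Nat × String)) :
    ∀ d : PySem.Dict String (List Int),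
    (evs.foldl (fun d e => pvTally d e.1 e.2) d).keys = PySem.Set.update d.keys (evs.map (·.2)) := by
  induction evs with
  | nil => intro d; rfl
  | cons e t ih =>
      intro d
      rw [List.foldl_cons, ih, List.map_cons, PySem.Set.update_cons, pvTally_keys]

theorem pvTallyFold_getD (evs : List (Nat × String)) :
    ∀ (d : PySem.Dict String (List Int)) (c : String) (a b k : Int),
    d.getD c [0, 0, 0] = [a, b, k] →
    (evs.foldl (fun d e => pvTally d e.1 e.2) d).getD c [0, 0, 0]
      = [a + (evs.count (0, c) : Int), b + (evs.count (1, c) : Int), k + (evs.count (2, c) : Int)] := by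
  induction evs with
  | nil => intro d c a b k h; simpa using h
  | cons e t ih =>
      intro d c a b k h
      obtain ⟨j, x⟩ := e
      rw [List.foldl_cons]
      by_cases hc : x = c
      · subst hc
        rcases j with _ | _ | _ | n
        · rw [ih _ _ (a + 1) b k (by rw [pvTally_getD, if_pos rfl, h]; rfl)]
          simp [Prod.ext_iff]
          ring
        · rw [ih _ _ a (b + 1) k (by rw [pvTally_getD, if_pos rfl, h]; rfl)]
          simp [Prod.ext_iff]
          ring
        · rw [ih _ _ a b (k + 1) (by rw [pvTally_getD, if_pos rfl, h]; rfl)]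
          simp [Prod.ext_iff]
          ring
        · rw [ih _ _ a b k (by
            rw [pvTally_getD, if_pos rfl, h, pvBump]
            simp [List.set_eq_of_length_le])]
          simp [Prod.ext_iff]
      · rw [ih _ _ a b k (by rw [pvTally_getD, if_neg (fun hh => hc hh.symm), h])]
        simp [Prod.ext_iff, hc]

-- ===== VERDICT (by name: the statement is the Claim_ definition above) =====
theorem compareEdits_spec : Claim_equal_compareEdits := by
  intro hyp_edits ref_edits _ _
  unfold Spec_compareEdits compareEdits compareEdits_alt
  dsimp only
  rw [pvLoopA1, pvLoopA2]
  set evsH := hyp_edits.flatMap (pvEvH ref_edits) with hH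
  set evsR := ref_edits.flatMap (pvEvR hyp_edits) with hR
  set events := evsH ++ evsR with hev
  have hfstH : ∀ e ∈ evsH, e.1 = 0 ∨ e.1 = 1 := pvEvH_fst ref_edits hyp_edits
  have hfstR : ∀ e ∈ evsR, e.1 = 2 := pvEvR_fst hyp_edits ref_edits
  -- the three totals
  have hR0 : pvStream 0 evsR = [] := pvStream_eq_nil (fun e he h0 => by have := hfstR e he; omega)
  have hR1 : pvStream 1 evsR = [] := pvStream_eq_nil (fun e he h0 => by have := hfstR e he; omega)
  have hH2 : pvStream 2 evsH = [] := pvStream_eq_nil (fun e he h0 => by rcases hfstH e he with h | h <;> omega)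
  have hs0 : pvStream 0 events = pvStream 0 evsH := by
    rw [hev, pvStream_append, hR0, List.append_nil]
  have hs1 : pvStream 1 events = pvStream 1 evsH := by
    rw [hev, pvStream_append, hR1, List.append_nil]
  have hs2 : pvStream 2 events = pvStream 2 evsR := by
    rw [hev, pvStream_append, hH2, List.nil_append]
  have htag : ∀ i : Nat, (PySem.Dict.counter (events.map (·.1))).getD i 0
      = ((pvStream i events).length : Int) := by
    intro i
    rw [PySem.Dict.getD_counter, pvCount_map_fst]
  -- the dict built by A, over the concatenated event stream
  have hDfold : evsR.foldl (fun d e => pvTally d e.1 e.2)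
        (evsH.foldl (fun d e => pvTally d e.1 e.2) PySem.Dict.empty)
      = events.foldl (fun d e => pvTally d e.1 e.2) PySem.Dict.empty := by
    rw [hev, List.foldl_append]
  have hkeys : (events.foldl (fun d e => pvTally d e.1 e.2) PySem.Dict.empty).keys
      = PySem.Set.ofList (events.map (·.2)) := by
    rw [pvTallyFold_keys, PySem.Dict.keys_empty, PySem.Set.update_nil_left]
  have hnd : (events.foldl (fun d e => pvTally d e.1 e.2) PySem.Dict.empty).keys.Nodup := by
    rw [hkeys]; exact PySem.Set.nodup_ofList _
  have hitems : (events.foldl (fun d e => pvTally d e.1 e.2) PySem.Dict.empty).items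
      = (PySem.Set.ofList (events.map (·.2))).map
          (fun c => (c, [(events.count (0, c) : Int),
                         (events.count (1, c) : Int),
                         (events.count (2, c) : Int)])) := by
    rw [PySem.Dict.items_eq_map_keys _ hnd [0, 0, 0], hkeys]
    refine List.map_congr_left (fun c _ => ?_)
    rw [pvTallyFold_getD events PySem.Dict.empty c 0 0 0 (PySem.Dict.getD_empty _ _)]
    simp
  simp only [Prod.mk.injEq]
  refine ⟨by rw [htag 0, hs0]; ring, by rw [htag 1, hs1]; ring, by rw [htag 2, hs2]; ring, ?_⟩
  rw [hDfold, hitems, PySem.List.dedup_eq_ofList]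
  refine List.map_congr_left (fun c _ => ?_)
  rw [PySem.Dict.getD_counter, PySem.Dict.getD_counter, PySem.Dict.getD_counter]
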